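-- pv_equiv track=rewrite | github.com/soon-haari/Tropical-Attack | tropical-attack/tropicalDS.py | deg_check_for_pol
-- ===== SOURCE A (Python) =====
-- from collections import OrderedDict
--
-- def deg_check_for_pol(A,deg,c):
--   d=OrderedDict()
--   for i in A: #go through all the monomials
--     if i[1] in d:#check whether degree can be found in the dict
--       d[i[1]].append(i)
--     else:
--       d[i[1]]=[i]
--   return c*deg in d
-- ===== SOURCE B (Python) =====
-- def deg_check_for_pol(A, deg, c):
--     degs = sorted(i[1] for i in A)
--     t = c * deg
--     lo, hi = 0, len(degs)
--     while lo < hi: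
--         mid = (lo + hi) // 2
--         v = degs[mid]
--         if v == t:
--             return True
--         elif v < t:
--             lo = mid + 1
--         else:
--             hi = mid
--     return False
-- ===== Notes on version B (the rewrite author's own statement) =====
-- stated objective: alternative
-- what changed: Replaced building an OrderedDict grouping monomials by degree and testing key membership with extracting the degrees, sorting them, and running a hand-written binary search for c*deg over the sorted list.
import Mathlib
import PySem

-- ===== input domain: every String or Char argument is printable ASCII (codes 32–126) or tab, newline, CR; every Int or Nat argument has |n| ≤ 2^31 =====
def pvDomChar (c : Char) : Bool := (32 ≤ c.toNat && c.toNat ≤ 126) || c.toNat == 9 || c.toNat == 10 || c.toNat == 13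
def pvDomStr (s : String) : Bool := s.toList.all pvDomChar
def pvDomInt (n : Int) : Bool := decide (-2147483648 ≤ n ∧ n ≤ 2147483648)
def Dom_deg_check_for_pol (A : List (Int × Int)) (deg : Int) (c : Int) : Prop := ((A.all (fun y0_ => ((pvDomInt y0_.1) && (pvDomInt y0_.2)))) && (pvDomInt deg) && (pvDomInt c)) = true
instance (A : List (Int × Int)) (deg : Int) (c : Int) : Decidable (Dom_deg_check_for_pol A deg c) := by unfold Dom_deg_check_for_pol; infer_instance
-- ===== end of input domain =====

-- B replaces A's group-by-degree dict plus key lookup by sorting the degree list and binary-searching it for c*deg (alternative algorithm).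


-- ===== PORT A =====
-- Port of A: build an insertion-ordered dict grouping monomials by degree, then test key membership.
def deg_check_for_pol (A : List (Int × Int)) (deg : Int) (c : Int) : Bool :=
  let d : PySem.Dict Int (List (Int × Int)) :=
    A.foldl (fun d i =>
      if d.contains i.2 then d.modify i.2 [] (fun l => l ++ [i])
      else d.insert i.2 [i]) PySem.Dict.empty
  d.contains (c * deg)

-- ===== PORT B =====
-- B's while-loop as structural recursion on hi - lo; degs[mid] is always in range (lo < hi ≤ length),
-- so the getD default is never used (exact port of the in-range Python index).
def pvBSearch (degs : List Int) (t : Int) (lo hi : Nat) : Bool :=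
  if _h : lo < hi then
    let mid := (lo + hi) / 2
    let v := degs.getD mid 0
    if v == t then true
    else if v < t then pvBSearch degs t (mid + 1) hi
    else pvBSearch degs t lo mid
  else false
termination_by hi - lo
decreasing_by all_goals omega

-- Port of B: sort the degrees, then binary-search for c*deg.
def deg_check_for_pol_alt (A : List (Int × Int)) (deg : Int) (c : Int) : Bool :=
  let degs := PySem.List.sorted (A.map (·.2)) (fun x => x) false
  pvBSearch degs (c * deg) 0 degs.length

-- ===== PRECONDITION & SPEC =====
def Spec_deg_check_for_pol (A : List (Int × Int)) (deg : Int) (c : Int) (out : Bool) : Prop := out = deg_check_for_pol_alt A deg c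
instance (A : List (Int × Int)) (deg : Int) (c : Int) (out : Bool) : Decidable (Spec_deg_check_for_pol A deg c out) := by unfold Spec_deg_check_for_pol; infer_instance

-- ===== CLAIM (what is proved, stated in full; the proofs are below) =====
def Claim_equal_deg_check_for_pol : Prop := ∀ (A : List (Int × Int)) (deg : Int) (c : Int), Dom_deg_check_for_pol A deg c → Spec_deg_check_for_pol A deg c (deg_check_for_pol A deg c)

-- ===== LEMMAS AND PROOFS =====

theorem contains_foldl_group {k : Int} (l : List (Int × Int)) (d : PySem.Dict Int (List (Int × Int))) :
    (l.foldl (fun d i =>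
      if d.contains i.2 then d.modify i.2 [] (fun l => l ++ [i])
      else d.insert i.2 [i]) d).contains k
    = (d.contains k || l.any (fun i => i.2 == k)) := by
  induction l generalizing d with
  | nil => simp
  | cons x xs ih =>
    simp only [List.foldl_cons, List.any_cons, ih]
    by_cases hc : d.contains x.2
    · simp only [if_pos hc, PySem.Dict.contains_modify]
      by_cases hx : k = x.2
      · subst hx; simp [hc]
      · simp [beq_eq_false_iff_ne.mpr hx, beq_eq_false_iff_ne.mpr (Ne.symm hx)]
    · simp only [if_neg hc, PySem.Dict.contains_insert]
      rw [BEq.comm (a := k) (b := x.2)]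
      cases (x.2 == k) <;> cases d.contains k <;> simp

theorem getD_mono_of_pairwise (s : List Int) (hs : s.Pairwise (· ≤ ·)) {i j : Nat}
    (hij : i ≤ j) (hj : j < s.length) : s.getD i 0 ≤ s.getD j 0 := by
  rcases Nat.lt_or_ge i j with h | h
  · rw [List.getD_eq_getElem _ _ (Nat.lt_trans h hj), List.getD_eq_getElem _ _ hj]
    exact List.pairwise_iff_getElem.mp hs i j _ _ h
  · have : i = j := Nat.le_antisymm hij h
    subst this; exact le_refl _

theorem pvBSearch_iff (s : List Int) (hs : s.Pairwise (· ≤ ·)) (t : Int) (lo hi : Nat)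
    (hhi : hi ≤ s.length) :
    pvBSearch s t lo hi = true ↔ ∃ i, lo ≤ i ∧ i < hi ∧ s.getD i 0 = t := by
  fun_induction pvBSearch s t lo hi with
  | case1 lo hi h mid v hv =>
    simp only [true_iff]
    exact ⟨mid, by omega, by omega, by exact eq_of_beq hv⟩
  | case2 lo hi h mid v hv hlt ih =>
    rw [ih hhi]
    constructor
    · rintro ⟨i, h1, h2, h3⟩; exact ⟨i, by omega, h2, h3⟩
    · rintro ⟨i, h1, h2, h3⟩
      refine ⟨i, ?_, h2, h3⟩
      by_contra hc
      have hle : i ≤ mid := by omega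
      have := getD_mono_of_pairwise s hs hle (by omega)
      rw [h3] at this
      omega
  | case3 lo hi h mid v hv hlt ih =>
    rw [ih (by omega)]
    have hvt : t < v := by
      rcases lt_trichotomy v t with h' | h' | h'
      · exact absurd h' hlt
      · exact absurd (beq_iff_eq.mpr h') (by simp_all)
      · exact h'
    constructor
    · rintro ⟨i, h1, h2, h3⟩; exact ⟨i, h1, by omega, h3⟩
    · rintro ⟨i, h1, h2, h3⟩
      refine ⟨i, h1, ?_, h3⟩
      by_contra hc
      have hle : mid ≤ i := by omega
      have := getD_mono_of_pairwise s hs hle (by omega)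
      rw [h3] at this
      omega
  | case4 lo hi h =>
    constructor
    · intro h'; exact absurd h' (by simp)
    · rintro ⟨i, h1, h2, _⟩; omega

theorem pvBSearch_mem (s : List Int) (hs : s.Pairwise (· ≤ ·)) (t : Int) :
    pvBSearch s t 0 s.length = (decide (t ∈ s)) := by
  rcases Bool.eq_false_or_eq_true (pvBSearch s t 0 s.length) with h | h <;> rw [h]
  · symm
    apply decide_eq_true
    obtain ⟨i, _, hi, hgi⟩ := (pvBSearch_iff s hs t 0 s.length (le_refl _)).mp h
    exact List.mem_iff_getElem.mpr ⟨i, hi, by rw [← List.getD_eq_getElem _ _ hi]; exact hgi⟩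
  · symm
    apply decide_eq_false
    intro hm
    obtain ⟨i, hi, hgi⟩ := List.mem_iff_getElem.mp hm
    have hT : pvBSearch s t 0 s.length = true := by
      rw [pvBSearch_iff s hs t 0 s.length (le_refl _)]
      exact ⟨i, Nat.zero_le _, hi, by rw [List.getD_eq_getElem _ _ hi]; exact hgi⟩
    rw [h] at hT; exact absurd hT (by simp)

-- ===== VERDICT (by name: the statement is the Claim_ definition above) =====
theorem deg_check_for_pol_spec : Claim_equal_deg_check_for_pol := by
  intro A deg c _
  unfold Spec_deg_check_for_pol deg_check_for_pol deg_check_for_pol_alt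
  rw [contains_foldl_group]
  rw [pvBSearch_mem _ (by simpa using PySem.List.sorted_pairwise (xs := A.map (·.2)) (key := fun x => x)) (c * deg)]
  rw [List.any_eq]
  simp only [show (PySem.Dict.empty : PySem.Dict Int (List (Int × Int))).contains (c * deg) = false from rfl, Bool.false_or]
  rw [decide_eq_decide]
  simp [PySem.List.mem_sorted, List.mem_map]
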